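-- pv_equiv track=rewrite | github.com/datalogisk-kantineforening/bankplotter | plot.py | fill_blanks
-- ===== SOURCE A (Python) =====
-- def fill_blanks(d):
--     prev_k = None
--     for k, v in sorted(d.items(), key=lambda a: a[0]):
--         if prev_k is not None:
--             for k2 in range(prev_k, k):
--                 d[k2] = d[prev_k]
--         prev_k = k
--     return d
-- ===== SOURCE B (Python) =====
-- def fill_blanks(d):
--     if d:
--         ks = sorted(d)
--         cur = d[ks[0]]
--         for k in range(ks[0], ks[-1] + 1):
--             if k in d:
--                 cur = d[k]
--             else:
--                 d[k] = cur
--     return d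
-- ===== Notes on version B (the rewrite author's own statement) =====
-- stated objective: simpler
-- what changed: Replaces A's nested loops (outer over sorted present keys, inner re-filling each gap from the previous key's value) with a single dense sweep over range(min,max+1) carrying a running value and a membership test.
import Mathlib
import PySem

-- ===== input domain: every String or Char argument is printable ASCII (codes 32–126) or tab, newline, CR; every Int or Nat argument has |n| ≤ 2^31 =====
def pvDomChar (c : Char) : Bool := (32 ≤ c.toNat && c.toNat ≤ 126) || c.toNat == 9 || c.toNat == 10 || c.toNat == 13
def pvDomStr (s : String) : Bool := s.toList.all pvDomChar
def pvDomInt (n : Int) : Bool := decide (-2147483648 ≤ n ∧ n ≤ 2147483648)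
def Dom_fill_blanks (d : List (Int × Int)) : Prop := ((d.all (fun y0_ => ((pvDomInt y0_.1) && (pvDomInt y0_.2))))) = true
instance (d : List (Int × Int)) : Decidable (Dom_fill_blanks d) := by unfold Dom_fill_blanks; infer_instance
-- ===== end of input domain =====

-- B replaces A's nested gap-filling loops with one dense sweep over range(min,max+1)
-- carrying a running value (objective: simpler). A mutates its dict argument in place;
-- the equivalence proved here is about the returned mapping (B performs the same mutation).

-- ===== PORT A =====
-- d[prev_k] is ported as getD _ 0: prev_k is always a present key there, so the default
-- is never used (exact on Pre_: unique keys).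
def fill_blanks (d : List (Int × Int)) : List (Int × Int) :=
  let dd : PySem.Dict Int Int := PySem.Dict.mk d
  let res := (PySem.List.sorted dd.items (fun a => a.1) false).foldl
    (fun (st : PySem.Dict Int Int × Option Int) kv =>
      match st.2 with
      | some p => ((PySem.List.pyRange p kv.1 1).foldl
            (fun dc k2 => dc.insert k2 (dc.getD p 0)) st.1, some kv.1)
      | none => (st.1, some kv.1))
    (dd, none)
  res.1.items

-- ===== PORT B =====
-- ks[0]/ks[-1] and d[ks[0]] are ported with default 0: ks is nonempty in this branch,
-- and ks[0] is a present key, so the defaults are never used (exact on Pre_).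
def fill_blanks_alt (d : List (Int × Int)) : List (Int × Int) :=
  let dd : PySem.Dict Int Int := PySem.Dict.mk d
  if dd.items.isEmpty then dd.items
  else
    let ks := PySem.List.sorted dd.keys (fun k => k) false
    let lo := PySem.List.pyGetD ks 0 0
    let hi := PySem.List.pyGetD ks (-1) 0
    let res := (PySem.List.pyRange lo (hi + 1) 1).foldl
      (fun (st : PySem.Dict Int Int × Int) k =>
        if st.1.contains k then (st.1, st.1.getD k 0)
        else (st.1.insert k st.2, st.2))
      (dd, dd.getD lo 0)
    res.1.items

-- ===== PRECONDITION & SPEC =====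
-- Pre_ excludes association lists with duplicate keys: they do not represent any Python
-- dict (A's parameter is a dict, whose keys are unique), so A is never called on them.
def Pre_fill_blanks (d : List (Int × Int)) : Prop := (d.map Prod.fst).Nodup

instance (d : List (Int × Int)) : Decidable (Pre_fill_blanks d) := by
  unfold Pre_fill_blanks; infer_instance

def pvWitness_fill_blanks : (List (Int × Int)) := [(1, 10), (4, 20), (2, 7)]

def Spec_fill_blanks (d : List (Int × Int)) (out : List (Int × Int)) : Prop := out = fill_blanks_alt d
instance (d : List (Int × Int)) (out : List (Int × Int)) : Decidable (Spec_fill_blanks d out) := by unfold Spec_fill_blanks; infer_instance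

-- ===== CLAIM (what is proved, stated in full; the proofs are below) =====
def Claim_equal_fill_blanks : Prop := ∀ (d : List (Int × Int)), Dom_fill_blanks d → Pre_fill_blanks d → Spec_fill_blanks d (fill_blanks d)

-- ===== LEMMAS AND PROOFS =====

theorem fb_insert_self (dd : PySem.Dict Int Int) (p : Int)
    (hnd : dd.keys.Nodup) (hc : dd.contains p = true) :
    dd.insert p (dd.getD p 0) = dd := by
  apply PySem.Dict.ext
  rw [PySem.Dict.items_insert_of_contains]
  · conv_rhs => rw [← List.map_id dd.items]
    apply List.map_congr_left
    intro q hq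
    by_cases h : q.1 = p
    · have h2 : dd.getD q.1 0 = q.2 :=
        PySem.Dict.getD_of_mem_items dd (show (q.1, q.2) ∈ dd.items by simpa using hq) hnd 0
      simp only [h] at h2
      simp only [h, BEq.rfl, if_pos, h2, id_eq]
      rw [← h]
    · simp [h]
  · exact hc

theorem fb_chain_le : ∀ (rest : List Int) (k : Int),
    (k :: rest).Pairwise (· < ·) → k ≤ rest.getLastD k := by
  intro rest
  induction rest with
  | nil => intro k _; simp
  | cons r rs ih =>
    intro k h
    have h1 : k < r := (List.pairwise_cons.mp h).1 r (by simp)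
    have h2 := ih r (List.pairwise_cons.mp h).2
    simp only [List.getLastD_cons]
    omega

theorem fb_pyGetD_neg_one (x : Int) (t : List Int) :
    PySem.List.pyGetD (x :: t) (-1) 0 = t.getLastD x := by
  induction t generalizing x with
  | nil => simp [PySem.List.pyGetD, PySem.List.pyGet?, PySem.List.pyIdx?]
  | cons y ys ih =>
    simp only [List.getLastD_cons]
    rw [← ih y]
    simp only [PySem.List.pyGetD, PySem.List.pyGet?, PySem.List.pyIdx?]
    norm_num
    congr 1

def fbSweep (dd : PySem.Dict Int Int) (p : Int) (ks : List Int) : PySem.Dict Int Int :=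
  match ks with
  | [] => dd
  | k :: rest =>
    fbSweep ((PySem.List.pyRange p k 1).foldl (fun dc k2 => dc.insert k2 (dc.getD p 0)) dd) k rest

theorem fb_foldA (l : List (Int × Int)) : ∀ (dd : PySem.Dict Int Int) (p : Int),
    ∃ q, l.foldl
      (fun (st : PySem.Dict Int Int × Option Int) kv =>
        match st.2 with
        | some p => ((PySem.List.pyRange p kv.1 1).foldl
              (fun dc k2 => dc.insert k2 (dc.getD p 0)) st.1, some kv.1)
        | none => (st.1, some kv.1))
      (dd, some p) = (fbSweep dd p (l.map Prod.fst), some q) := by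
  induction l with
  | nil => intro dd p; exact ⟨p, rfl⟩
  | cons kv t ih =>
    intro dd p
    simp only [List.foldl_cons, List.map_cons, fbSweep]
    exact ih _ kv.1

theorem fb_foldB_const (k : Int) : ∀ (n : Nat) (a : Int) (dd : PySem.Dict Int Int) (c : Int),
    (k - a).toNat = n → (∀ j, a ≤ j → j < k → dd.contains j = false) →
    (PySem.List.pyRange a k 1).foldl
      (fun (st : PySem.Dict Int Int × Int) k =>
        if st.1.contains k then (st.1, st.1.getD k 0)
        else (st.1.insert k st.2, st.2))
      (dd, c)
    = ((PySem.List.pyRange a k 1).foldl (fun dc j => dc.insert j c) dd, c) := by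
  intro n
  induction n with
  | zero =>
    intro a dd c hn _
    rw [PySem.List.pyRange_one_eq_nil (by omega)]
    simp
  | succ m ih =>
    intro a dd c hn hcont
    have hak : a < k := by omega
    rw [PySem.List.pyRange_one_cons hak]
    simp only [List.foldl_cons, hcont a le_rfl hak, Bool.false_eq_true]
    exact ih (a + 1) (dd.insert a c) c (by omega)
      (fun j hj1 hj2 => by
        rw [PySem.Dict.contains_insert]
        have : (j == a) = false := by simp; omega
        rw [this, Bool.false_or]
        exact hcont j (by omega) hj2)

theorem fb_gap_const (k p : Int) : ∀ (n : Nat) (a : Int) (dd : PySem.Dict Int Int) (v : Int),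
    (k - a).toNat = n → p < a → dd.getD p 0 = v →
    (PySem.List.pyRange a k 1).foldl (fun dc j => dc.insert j (dc.getD p 0)) dd
    = (PySem.List.pyRange a k 1).foldl (fun dc j => dc.insert j v) dd := by
  intro n
  induction n with
  | zero =>
    intro a dd v hn _ _
    rw [PySem.List.pyRange_one_eq_nil (by omega)]
    simp
  | succ m ih =>
    intro a dd v hn hpa hv
    have hak : a < k := by omega
    rw [PySem.List.pyRange_one_cons hak]
    simp only [List.foldl_cons, hv]
    exact ih (a + 1) (dd.insert a v) v (by omega) (by omega)
      (by rw [PySem.Dict.getD_insert_of_ne] <;> [exact hv; omega])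

theorem fb_gap_eq (dd : PySem.Dict Int Int) (p k : Int)
    (hnd : dd.keys.Nodup) (hc : dd.contains p = true) (hpk : p < k) :
    (PySem.List.pyRange p k 1).foldl (fun dc k2 => dc.insert k2 (dc.getD p 0)) dd
    = (PySem.List.pyRange (p + 1) k 1).foldl (fun dc j => dc.insert j (dd.getD p 0)) dd := by
  rw [PySem.List.pyRange_one_cons hpk]
  simp only [List.foldl_cons]
  rw [fb_insert_self dd p hnd hc]
  exact fb_gap_const k p (k - (p+1)).toNat (p+1) dd (dd.getD p 0) rfl (by omega) rfl

theorem fb_foldB (kt : List Int) : ∀ (p : Int) (dd : PySem.Dict Int Int) (c0 : Int),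
    dd.keys.Nodup → dd.contains p = true → (p :: kt).Pairwise (· < ·) →
    (∀ j, p < j → (dd.contains j = true ↔ j ∈ kt)) →
    ∃ c, (PySem.List.pyRange p (kt.getLastD p + 1) 1).foldl
      (fun (st : PySem.Dict Int Int × Int) k =>
        if st.1.contains k then (st.1, st.1.getD k 0)
        else (st.1.insert k st.2, st.2))
      (dd, c0) = (fbSweep dd p kt, c) := by
  induction kt with
  | nil =>
    intro p dd c0 _ hc _ _
    refine ⟨dd.getD p 0, ?_⟩
    rw [List.getLastD_nil, PySem.List.pyRange_one_singleton]
    simp [fbSweep, hc]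
  | cons k rest ih =>
    intro p dd c0 hnd hc hpw hcont
    have hpk : p < k := (List.pairwise_cons.mp hpw).1 k (by simp)
    have hkrest : (k :: rest).Pairwise (· < ·) := (List.pairwise_cons.mp hpw).2
    have hk_le : k ≤ rest.getLastD k := fb_chain_le rest k hkrest
    rw [List.getLastD_cons,
        PySem.List.pyRange_one_append p k (rest.getLastD k + 1) (by omega) (by omega),
        List.foldl_append, PySem.List.pyRange_one_cons hpk, List.foldl_cons]
    simp only [hc, if_pos]
    rw [fb_foldB_const k (k - (p+1)).toNat (p+1) dd (dd.getD p 0) rfl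
        (fun j hj1 hj2 => by
          have h1 := hcont j (by omega)
          have h2 : j ∉ k :: rest := by
            intro hmem
            rcases List.mem_cons.mp hmem with h | h
            · omega
            · exact absurd ((List.pairwise_cons.mp hkrest).1 j h) (by omega)
          rcases Bool.eq_false_or_eq_true (dd.contains j) with h | h
          · exact absurd (h1.mp h) h2
          · exact h)]
    rw [← fb_gap_eq dd p k hnd hc hpk]
    have hnd' : ((PySem.List.pyRange p k 1).foldl
        (fun dc k2 => dc.insert k2 (dc.getD p 0)) dd).keys.Nodup :=
      PySem.Dict.nodup_keys_foldl_insert _ _ _ hnd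
    have hkeys' : ((PySem.List.pyRange p k 1).foldl
        (fun dc k2 => dc.insert k2 (dc.getD p 0)) dd).keys
        = PySem.Set.update dd.keys (PySem.List.pyRange p k 1) :=
      PySem.Dict.keys_foldl_insert _ _ _
    have hc' : ((PySem.List.pyRange p k 1).foldl
        (fun dc k2 => dc.insert k2 (dc.getD p 0)) dd).contains k = true := by
      rw [PySem.Dict.contains_iff_mem_keys, hkeys', PySem.Set.mem_update]
      left
      rw [← PySem.Dict.contains_iff_mem_keys]
      exact (hcont k hpk).mpr (by simp)
    have hcont' : ∀ j, k < j →
        (((PySem.List.pyRange p k 1).foldl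
          (fun dc k2 => dc.insert k2 (dc.getD p 0)) dd).contains j = true ↔ j ∈ rest) := by
      intro j hj
      rw [PySem.Dict.contains_iff_mem_keys, hkeys', PySem.Set.mem_update,
          PySem.List.mem_pyRange_one, ← PySem.Dict.contains_iff_mem_keys, hcont j (by omega)]
      constructor
      · rintro (h | h)
        · rcases List.mem_cons.mp h with h' | h'
          · omega
          · exact h'
        · omega
      · intro h; left; exact List.mem_cons_of_mem _ h
    simpa [fbSweep] using ih k _ (dd.getD p 0) hnd' hc' hkrest hcont'

theorem fb_sorted_keys_lt (dd : PySem.Dict Int Int) (hnd : dd.keys.Nodup) :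
    (PySem.List.sorted dd.keys (fun k => k) false).Pairwise (· < ·) := by
  have h1 : (PySem.List.sorted dd.keys (fun k => k) false).Pairwise (· ≤ ·) := by
    simpa using PySem.List.sorted_pairwise dd.keys (fun k => k)
  have h2 : (PySem.List.sorted dd.keys (fun k => k) false).Nodup :=
    (PySem.List.sorted_perm dd.keys (fun k => k) false).nodup_iff.mpr hnd
  have := List.Pairwise.and h1 (List.nodup_iff_pairwise_ne.mp h2)
  exact this.imp (fun h => lt_of_le_of_ne h.1 h.2)

theorem fb_sorted_items (dd : PySem.Dict Int Int) (hnd : dd.keys.Nodup) :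
    PySem.List.sorted dd.items (fun a => a.1) false
    = (PySem.List.sorted dd.keys (fun k => k) false).map (fun k => (k, dd.getD k 0)) := by
  apply PySem.List.sorted_eq_of_perm_of_pairwise_lt
  · have h1 : dd.items = dd.keys.map (fun k => (k, dd.getD k 0)) :=
      PySem.Dict.items_eq_map_keys dd hnd 0
    rw [h1]
    exact (PySem.List.sorted_perm dd.keys (fun k => k) false).map _
  · rw [List.pairwise_map]
    exact fb_sorted_keys_lt dd hnd

-- ===== VERDICT (by name: the statement is the Claim_ definition above) =====
theorem fill_blanks_spec : Claim_equal_fill_blanks := by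
  intro d _ hpre
  show fill_blanks d = fill_blanks_alt d
  by_cases hd : d = []
  · subst hd; decide
  · simp only [fill_blanks, fill_blanks_alt]
    have hnd : (PySem.Dict.mk d).keys.Nodup := by
      simpa [PySem.Dict.keys_mk] using hpre
    have hitems : (PySem.Dict.mk d).items = d := rfl
    have hne : ((PySem.Dict.mk d).items.isEmpty) = false := by
      rw [hitems]; simpa using hd
    rw [hne]
    simp only [Bool.false_eq_true]
    rcases hcase : PySem.List.sorted (PySem.Dict.mk d).keys (fun k => k) false with _ | ⟨k0, kt⟩
    · exfalso
      exact hd (by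
        have := (PySem.List.sorted_eq_nil_iff _ _ _).mp hcase
        have h2 : d.map Prod.fst = [] := by rwa [PySem.Dict.keys_mk] at this
        exact List.map_eq_nil_iff.mp h2)
    · have hmemks : ∀ j, j ∈ (PySem.Dict.mk d).keys ↔ j ∈ k0 :: kt := by
        intro j
        rw [← hcase]
        exact (PySem.List.mem_sorted _ _ _ _).symm
      have hc0 : (PySem.Dict.mk d).contains k0 = true := by
        rw [PySem.Dict.contains_iff_mem_keys]
        exact (hmemks k0).mpr (by simp)
      have hpw : (k0 :: kt).Pairwise (· < ·) := by
        rw [← hcase]; exact fb_sorted_keys_lt _ hnd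
      -- A side
      rw [fb_sorted_items _ hnd, hcase, List.map_cons, List.foldl_cons]
      obtain ⟨q, hA⟩ := fb_foldA (kt.map (fun k => (k, (PySem.Dict.mk d).getD k 0)))
        (PySem.Dict.mk d) k0
      have hmap : List.map Prod.fst (List.map (fun k => (k, (PySem.Dict.mk d).getD k 0)) kt) = kt := by
        rw [List.map_map]
        conv_rhs => rw [← List.map_id kt]
        apply List.map_congr_left
        intro a _
        rfl
      rw [hmap] at hA
      rw [hA]
      -- B side
      have hlo : PySem.List.pyGetD (k0 :: kt) (0 : Int) 0 = k0 := by
        simp [PySem.List.pyGetD, PySem.List.pyGet?, PySem.List.pyIdx?]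
      rw [hlo, fb_pyGetD_neg_one]
      obtain ⟨c, hB⟩ := fb_foldB kt k0 (PySem.Dict.mk d) ((PySem.Dict.mk d).getD k0 0)
        hnd hc0 hpw
        (fun j hj => by
          rw [PySem.Dict.contains_iff_mem_keys, hmemks j, List.mem_cons]
          constructor
          · rintro (h | h)
            · omega
            · exact h
          · intro h; right; exact h)
      rw [hB]
      simp
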